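-- pv_equiv track=rewrite | github.com/valeriacavalcanti/IP-2022.2 | Avaliacoes/Terceira/funcoes.py | menor
-- ===== SOURCE A (Python) =====
-- def menor(lista):
--     lances = []
--     for i in range(len(lista)):
--         if (lista[i] not in lances):
--             lances.append(lista[i])
--     qt = [0] * len(lances)
--     for i in range(len(lances)):
--         qt[i] = lista.count(lances[i])
--     unicos = []
--     for i in range(len(lances)):
--         if (qt[i] == 1):
--             unicos.append(lances[i])
--     if (len(unicos) > 0):
--         unicos.sort()
--         return unicos[0]
--     else:
--         return -1
-- ===== SOURCE B (Python) =====
-- def menor(lista):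
--     # Sort a copy, then scan runs: the first value whose run has length 1
--     # is the smallest value occurring exactly once; otherwise -1.
--     s = sorted(lista)
--     while s:
--         if len(s) < 2 or s[1] != s[0]:
--             return s[0]
--         x = s[0]
--         i = 1
--         while i < len(s) and s[i] == x:
--             i += 1
--         s = s[i:]
--     return -1
-- ===== Notes on version B (the rewrite author's own statement) =====
-- stated objective: faster
-- what changed: A builds an order-preserving dedup list, then a per-value count table (a count scan per distinct value), then sorts the singletons and takes the head; B sorts a copy of the input once and scans it in runs of equal values, returning the value of the first run of length 1 (the smallest singleton) or -1.
import Mathlib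
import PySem

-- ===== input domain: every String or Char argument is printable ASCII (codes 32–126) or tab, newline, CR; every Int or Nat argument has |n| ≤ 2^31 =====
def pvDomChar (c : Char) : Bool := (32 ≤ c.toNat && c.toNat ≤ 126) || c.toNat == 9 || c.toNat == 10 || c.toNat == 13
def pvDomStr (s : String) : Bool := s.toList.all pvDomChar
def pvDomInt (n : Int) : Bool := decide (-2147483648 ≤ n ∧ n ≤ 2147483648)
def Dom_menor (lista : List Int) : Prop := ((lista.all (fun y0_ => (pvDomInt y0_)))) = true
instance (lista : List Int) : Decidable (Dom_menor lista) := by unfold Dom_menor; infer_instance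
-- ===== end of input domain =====

-- B replaces A's quadratic dedup + per-value count + sort-of-singletons with a single sort of a
-- copy followed by one run-length scan returning the first (= smallest) singleton run (objective: faster).

-- ===== PORT A =====
-- Literal port of A: dedup loop (first occurrences), count table, singleton list, sort, head.
-- Indices from range(len(…)) are always in range, so pyGetD's default 0 and .toNat in .set are never used.
def menor (lista : List Int) : Int :=
  let lances : List Int :=
    (PySem.List.pyRange 0 (PySem.List.len lista) 1).foldl
      (fun acc i => if (PySem.List.pyGetD lista i 0) ∈ acc then acc
                    else acc ++ [PySem.List.pyGetD lista i 0]) []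
  let qt : List Int :=
    (PySem.List.pyRange 0 (PySem.List.len lances) 1).foldl
      (fun q i => q.set i.toNat ((PySem.List.count lista (PySem.List.pyGetD lances i 0) : Int)))
      (List.replicate lances.length 0)
  let unicos : List Int :=
    (PySem.List.pyRange 0 (PySem.List.len lances) 1).foldl
      (fun u i => if PySem.List.pyGetD qt i 0 = 1 then u ++ [PySem.List.pyGetD lances i 0] else u) []
  if unicos.length > 0 then
    PySem.List.pyGetD (PySem.List.sorted unicos (fun x => x) false) 0 (-1)
  else -1

-- ===== PORT B =====
-- Run scan over the sorted copy: if the head is repeated, drop its whole run and continue,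
-- otherwise the head is the answer.
def menorRun : List Int → Int
  | [] => -1
  | x :: rest =>
    if rest.head? = some x then
      menorRun (rest.dropWhile (fun z => z == x))
    else x
termination_by l => l.length
decreasing_by
  simp only [List.length_cons]
  exact Nat.lt_succ_of_le (List.length_dropWhile_le _ _)

def menor_alt (lista : List Int) : Int :=
  menorRun (PySem.List.sorted lista (fun x => x) false)

-- ===== PRECONDITION & SPEC =====
def Spec_menor (lista : List Int) (out : Int) : Prop := out = menor_alt lista
instance (lista : List Int) (out : Int) : Decidable (Spec_menor lista out) := by unfold Spec_menor; infer_instance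

-- ===== CLAIM (what is proved, stated in full; the proofs are below) =====
def Claim_equal_menor : Prop := ∀ (lista : List Int), Dom_menor lista → Spec_menor lista (menor lista)

-- ===== LEMMAS AND PROOFS =====

theorem pv_dedupf_mem (l : List Int) : ∀ (acc : List Int) (y : Int),
    (y ∈ l.foldl (fun acc x => if x ∈ acc then acc else acc ++ [x]) acc ↔ y ∈ acc ∨ y ∈ l) := by
  induction l with
  | nil => intro acc y; simp
  | cons a l ih =>
    intro acc y
    simp only [List.foldl_cons]
    by_cases ha : a ∈ acc
    · simp only [if_pos ha, ih]
      constructor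
      · rintro (h | h)
        · exact Or.inl h
        · exact Or.inr (List.mem_cons_of_mem _ h)
      · rintro (h | h)
        · exact Or.inl h
        · rcases List.mem_cons.mp h with rfl | h
          · exact Or.inl ha
          · exact Or.inr h
    · simp only [if_neg ha, ih, List.mem_append, List.mem_cons]
      tauto

theorem pv_dedupf_nodup (l : List Int) : ∀ (acc : List Int), acc.Nodup →
    (l.foldl (fun acc x => if x ∈ acc then acc else acc ++ [x]) acc).Nodup := by
  induction l with
  | nil => intro acc h; simpa using h
  | cons a l ih =>
    intro acc h
    simp only [List.foldl_cons]
    by_cases ha : a ∈ acc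
    · simpa [if_pos ha] using ih acc h
    · refine ih _ ?_
      rw [if_neg ha]
      exact List.Nodup.append h (List.nodup_singleton a) (by simpa using ha)

theorem pv_setfold (xs : List Int) (f : Int → Int) : ∀ (k : Nat), k ≤ xs.length →
    (PySem.List.pyRange 0 (k : Int) 1).foldl
      (fun q i => q.set i.toNat (f (PySem.List.pyGetD xs i 0))) (List.replicate xs.length 0)
    = (xs.take k).map f ++ List.replicate (xs.length - k) 0 := by
  intro k
  induction k with
  | zero => intro _; simp [PySem.List.pyRange_one_eq_nil]
  | succ k ih =>
    intro hk
    have hk' : k ≤ xs.length := Nat.le_of_succ_le hk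
    have hklt : k < xs.length := hk
    have hr : PySem.List.pyRange 0 ((k+1 : Nat) : Int) 1
        = PySem.List.pyRange 0 (k : Int) 1 ++ [(k : Int)] := by
      push_cast
      exact PySem.List.pyRange_one_succ_right (by positivity)
    rw [hr, List.foldl_append, ih hk']
    simp only [List.foldl_cons, List.foldl_nil]
    have hget : PySem.List.pyGetD xs (k : Int) 0 = xs[k] := by
      rw [PySem.List.pyGetD_natCast, List.getD_eq_getElem xs 0 hklt]
    have hlen : ((xs.take k).map f).length = k := by
      simp [List.length_take, Nat.min_eq_left hk']
    have hrep : List.replicate (xs.length - k) (0:Int)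
        = 0 :: List.replicate (xs.length - (k+1)) 0 := by
      have : xs.length - k = (xs.length - (k+1)) + 1 := by omega
      rw [this, List.replicate_succ]
    rw [hget, Int.toNat_natCast, List.set_append, hlen]
    rw [if_neg (by omega), hrep, Nat.sub_self]
    rw [show List.take (k+1) xs = List.take k xs ++ (xs[k]?).toList from List.take_add_one]
    rw [List.getElem?_eq_getElem hklt]
    rw [List.map_append, List.set_cons_zero]; simp

theorem pv_filterfold (lances : List Int) (f : Int → Int) : ∀ (k : Nat), k ≤ lances.length →
    (PySem.List.pyRange 0 (k : Int) 1).foldl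
      (fun u i => if PySem.List.pyGetD (lances.map f) i 0 = 1 then u ++ [PySem.List.pyGetD lances i 0] else u) []
    = (lances.take k).filter (fun x => decide (f x = 1)) := by
  intro k
  induction k with
  | zero => intro _; simp [PySem.List.pyRange_one_eq_nil]
  | succ k ih =>
    intro hk
    have hk' : k ≤ lances.length := Nat.le_of_succ_le hk
    have hklt : k < lances.length := hk
    have hr : PySem.List.pyRange 0 ((k+1 : Nat) : Int) 1
        = PySem.List.pyRange 0 (k : Int) 1 ++ [(k : Int)] := by
      push_cast
      exact PySem.List.pyRange_one_succ_right (by positivity)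
    rw [hr, List.foldl_append, ih hk']
    simp only [List.foldl_cons, List.foldl_nil]
    have hget : PySem.List.pyGetD lances (k : Int) 0 = lances[k] := by
      rw [PySem.List.pyGetD_natCast, List.getD_eq_getElem lances 0 hklt]
    have hgetq : PySem.List.pyGetD (lances.map f) (k : Int) 0 = f lances[k] := by
      rw [PySem.List.pyGetD_natCast,
          List.getD_eq_getElem (lances.map f) 0 (by simpa using hklt)]
      simp
    rw [hget, hgetq,
        show List.take (k+1) lances = List.take k lances ++ (lances[k]?).toList from List.take_add_one,
        List.getElem?_eq_getElem hklt]
    simp only [Option.toList_some, List.filter_append, List.filter_cons, List.filter_nil]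
    by_cases h1 : f lances[k] = 1
    · rw [if_pos h1]; simp [h1]
    · rw [if_neg h1]; simp [h1]

def pvSing (lista : List Int) : Int → Bool := fun x => lista.count x == 1

theorem pv_sorted_unicos (lista lances : List Int) (hnd : lances.Nodup)
    (hmem : ∀ y, y ∈ lances ↔ y ∈ lista) :
    PySem.List.sorted (lances.filter (pvSing lista)) (fun x => x) false
      = (PySem.List.sorted lista (fun x => x) false).filter (pvSing lista) := by
  set s := PySem.List.sorted lista (fun x => x) false with hs
  have hsperm : s.Perm lista := PySem.List.sorted_perm lista _ _
  have hcs : ∀ a, s.count a = lista.count a := fun a => hsperm.count_eq a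
  have hcf : ∀ (l : List Int) (a : Int), (l.filter (pvSing lista)).count a
      = if pvSing lista a then l.count a else 0 := by
    intro l a
    by_cases hp : pvSing lista a
    · rw [if_pos hp, List.count_filter hp]
    · rw [if_neg hp, List.count_eq_zero]
      intro hmem'
      exact hp (List.of_mem_filter hmem')
  have hperm : (s.filter (pvSing lista)).Perm (lances.filter (pvSing lista)) := by
    rw [List.perm_iff_count]
    intro a
    rw [hcf, hcf]
    by_cases hp : pvSing lista a
    · rw [if_pos hp, if_pos hp, hcs]
      have h1 : lista.count a = 1 := by simpa [pvSing] using hp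
      have hmema : a ∈ lista := by
        rw [← List.count_pos_iff]; omega
      have h2 : lances.count a = 1 :=
        Nat.le_antisymm (List.nodup_iff_count_le_one.mp hnd a)
          (List.count_pos_iff.mpr ((hmem a).mpr hmema))
      rw [h1, h2]
    · rw [if_neg hp, if_neg hp]
  have hle : (s.filter (pvSing lista)).Pairwise (· ≤ ·) := by
    have := (PySem.List.sorted_pairwise lista (fun x => x)).filter (pvSing lista)
    exact this.imp (fun h => h)
  have hndf : (s.filter (pvSing lista)).Nodup := by
    rw [List.nodup_iff_count_le_one]
    intro a
    rw [hcf]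
    by_cases hp : pvSing lista a
    · rw [if_pos hp, hcs]
      have : lista.count a = 1 := by simpa [pvSing] using hp
      omega
    · rw [if_neg hp]; omega
  have hlt : (s.filter (pvSing lista)).Pairwise (fun a b => (fun x => x) a < (fun x => x) b) :=
    (hle.and hndf).imp (fun ⟨h1, h2⟩ => lt_of_le_of_ne h1 h2)
  exact PySem.List.sorted_eq_of_perm_of_pairwise_lt _ _ _ hperm hlt

theorem pv_dropWhile_head_false (p : Int → Bool) : ∀ (l : List Int) (z0 : Int) (t2 : List Int),
    l.dropWhile p = z0 :: t2 → p z0 = false := by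
  intro l
  induction l with
  | nil => intro z0 t2 h; simp at h
  | cons a l ih =>
    intro z0 t2 h
    rw [List.dropWhile_cons] at h
    by_cases hp : p a
    · rw [if_pos hp] at h; exact ih z0 t2 h
    · rw [if_neg hp] at h
      obtain ⟨rfl, -⟩ : a = z0 ∧ l = t2 := by simpa using h
      simpa using hp

theorem pv_run_char : ∀ (n : Nat) (s : List Int), s.length ≤ n → s.Pairwise (· ≤ ·) →
    menorRun s = (match s.filter (fun x => s.count x == 1) with
                  | [] => -1 | m :: _ => m) := by
  intro n
  induction n with
  | zero =>
    intro s hs _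
    rw [List.length_eq_zero_iff.mp (Nat.le_zero.mp hs), menorRun]
    rfl
  | succ n ih =>
    intro s hlen hpw
    match s, hlen, hpw with
    | [], _, _ => ?_
    | x :: rest, hlen, hpw => ?_
    case _ => rw [menorRun]; rfl
    case _ =>
      have hx : ∀ z ∈ rest, x ≤ z := (List.pairwise_cons.mp hpw).1
      have hpr : rest.Pairwise (· ≤ ·) := (List.pairwise_cons.mp hpw).2
      rw [menorRun]
      by_cases hh : rest.head? = some x
      · rw [if_pos hh]
        obtain ⟨r2, rfl⟩ : ∃ r2, rest = x :: r2 := by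
          cases rest with
          | nil => simp at hh
          | cons y r2 => exact ⟨r2, by simpa using (Option.some.inj hh).symm ▸ rfl⟩
        set q : Int → Bool := fun z => z == x with hq
        set t := (x :: r2).dropWhile q with ht
        have hsub : t.Sublist (x :: r2) := List.dropWhile_sublist q
        have hts : t.Pairwise (· ≤ ·) := hpr.sublist hsub
        have htgt : ∀ z ∈ t, x < z := by
          cases hc : t with
          | nil => intro z hz; simp at hz
          | cons z0 t2 =>
            have hz0 : q z0 = false := pv_dropWhile_head_false q (x :: r2) z0 t2 (by rw [← ht, hc])
            have hz0' : z0 ≠ x := by simpa [hq] using hz0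
            have hz0mem : z0 ∈ x :: r2 := hsub.mem (by simp [hc])
            have hxz0 : x ≤ z0 := hx z0 hz0mem
            have hxlt : x < z0 := lt_of_le_of_ne hxz0 (Ne.symm hz0')
            intro z hz
            rcases List.mem_cons.mp hz with rfl | hz2
            · exact hxlt
            · have : z0 ≤ z := by
                have := (List.pairwise_cons.mp (hc ▸ hts)).1
                exact this z hz2
              omega
        have hdec : (x :: r2).takeWhile q ++ t = x :: r2 := by
          rw [ht]; exact List.takeWhile_append_dropWhile
        have htkx : ∀ w ∈ (x :: r2).takeWhile q, w = x := by
          intro w hw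
          have := List.mem_takeWhile_imp hw
          simpa [hq] using this
        -- counts agree between s and t on members of t
        have hcnt : ∀ z ∈ t, (x :: x :: r2).count z = t.count z := by
          intro z hz
          have hzx : z ≠ x := by
            have := htgt z hz; omega
          rw [List.count_cons_of_ne (Ne.symm hzx), ← hdec, List.count_append]
          have : ((x :: r2).takeWhile q).count z = 0 := by
            rw [List.count_eq_zero]
            intro hmem
            exact hzx (htkx z hmem)
          omega
        -- filter of s equals filter of t with t's own counts
        have hcx : (x :: x :: r2).count x ≠ 1 := by
          rw [List.count_cons_self]
          have : (x :: r2).count x = r2.count x + 1 := List.count_cons_self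
          omega
        have hfil : (x :: x :: r2).filter (fun z => (x :: x :: r2).count z == 1)
            = t.filter (fun z => t.count z == 1) := by
          set P : Int → Bool := fun z => (x :: x :: r2).count z == 1 with hP
          rw [List.filter_cons, if_neg (by simp only [hP]; simpa using hcx)]
          conv_lhs => rw [show (x :: r2 : List Int) = (x :: r2).takeWhile q ++ t from hdec.symm]
          rw [List.filter_append]
          have h1 : ((x :: r2).takeWhile q).filter P = [] := by
            rw [List.filter_eq_nil_iff]
            intro w hw
            rw [htkx w hw, hP]
            simpa using hcx
          rw [h1, List.nil_append]
          apply List.filter_congr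
          intro z hz
          rw [hP]
          simp only []
          rw [hcnt z hz]
        rw [hfil]
        have hlt : t.length ≤ n := by
          have h1 : t.length ≤ (x :: r2).length := List.Sublist.length_le hsub
          simp only [List.length_cons] at hlen h1 ⊢
          omega
        exact ih t hlt hts
      · rw [if_neg hh]
        have hcr : rest.count x = 0 := by
          rw [List.count_eq_zero]
          intro hmem
          cases rest with
          | nil => simp at hmem
          | cons y r2 =>
            have hyx : y ≠ x := fun h => hh (by rw [h]; rfl)
            have hxy : x < y := lt_of_le_of_ne (hx y (by simp)) (Ne.symm hyx)
            rcases List.mem_cons.mp hmem with rfl | h2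
            · omega
            · have : y ≤ x := (List.pairwise_cons.mp hpr).1 x h2
              omega
        have hpx : (x :: rest).count x == 1 := by
          simp [List.count_cons_self, hcr]
        rw [List.filter_cons, if_pos (by simpa using hpx)]

theorem pv_menor_closed (lista : List Int) :
    ∃ lances : List Int, lances.Nodup ∧ (∀ y, y ∈ lances ↔ y ∈ lista) ∧
      menor lista = (match PySem.List.sorted (lances.filter (pvSing lista)) (fun x => x) false with
                     | [] => -1 | m :: _ => m) := by
  have hded := PySem.List.foldl_pyRange_zero_pyGetD lista 0
      (fun acc v => if v ∈ acc then acc else acc ++ [v]) []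
  set L := lista.foldl (fun acc v => if v ∈ acc then acc else acc ++ [v]) [] with hL
  refine ⟨L, pv_dedupf_nodup lista [] List.nodup_nil, fun y => by
    have := pv_dedupf_mem lista [] y
    simpa using this, ?_⟩
  unfold menor
  rw [hded]
  simp only []
  rw [show PySem.List.len L = ((L.length : Nat) : Int) from PySem.List.len_eq L]
  rw [pv_setfold L (fun x => ((PySem.List.count lista x : Nat) : Int)) L.length le_rfl]
  rw [List.take_length, Nat.sub_self, List.replicate_zero, List.append_nil]
  rw [pv_filterfold L (fun x => ((PySem.List.count lista x : Nat) : Int)) L.length le_rfl]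
  rw [List.take_length]
  have hpred : (fun x => decide (((PySem.List.count lista x : Nat) : Int) = 1)) = pvSing lista := by
    funext x
    simp only [pvSing, PySem.List.count_eq, Nat.cast_eq_one]
    cases h : List.count x lista == 1 <;> simp_all
  rw [hpred]
  rcases hu : L.filter (pvSing lista) with _ | ⟨m0, t0⟩
  · rw [show PySem.List.sorted ([] : List Int) (fun x => x) false = []
        from (PySem.List.sorted_eq_nil_iff _ _ _).mpr rfl]
    simp
  · have hsne : PySem.List.sorted (m0 :: t0) (fun x => x) false ≠ [] := by
      rw [Ne, PySem.List.sorted_eq_nil_iff]; simp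
    rcases hs : PySem.List.sorted (m0 :: t0) (fun x => x) false with _ | ⟨m, t⟩
    · exact absurd hs hsne
    · simp only [List.length_cons, gt_iff_lt, if_pos (by omega : 0 < t0.length + 1)]
      have h0 : PySem.List.pyGetD (m :: t) ((0:Nat) : Int) (-1) = m := by
        rw [PySem.List.pyGetD_natCast]; rfl
      simp only [Nat.cast_zero] at h0
      exact h0

-- ===== VERDICT (by name: the statement is the Claim_ definition above) =====
theorem menor_spec : Claim_equal_menor := by
  intro lista _
  unfold Spec_menor menor_alt
  obtain ⟨lances, hnd, hmem, hA⟩ := pv_menor_closed lista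
  rw [hA, pv_sorted_unicos lista lances hnd hmem]
  set s := PySem.List.sorted lista (fun x => x) false with hs
  have hperm : s.Perm lista := PySem.List.sorted_perm lista _ _
  have hp : (pvSing lista) = (fun x => s.count x == 1) := by
    funext x; simp [pvSing, hperm.count_eq x]
  rw [hp, pv_run_char s.length s le_rfl (PySem.List.sorted_pairwise lista (fun x => x))]
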